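-- pv_equiv track=rewrite | github.com/LeninGarcia09/ResponsibleAIAgent | backend/app.py | build_advanced_prompt
-- ===== SOURCE A (Python) =====
-- def build_advanced_prompt(project_data):
--     """Build a comprehensive prompt from the advanced review questionnaire."""
--     sections = []
--
--     # Project Overview
--     sections.append(f"""## Project Overview
-- - **Project Name**: {project_data.get('project_name', 'Not provided')}
-- - **Deployment Stage**: {project_data.get('deployment_stage', 'Not specified')}""")
--
--     # Purpose & Use Case
--     if any(project_data.get(f) for f in ['intended_purpose', 'business_problem', 'end_users']):
--         sections.append(f"""## Purpose & Use Case
-- - **Intended Purpose**: {project_data.get('intended_purpose', 'Not provided')}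
-- - **Business Problem**: {project_data.get('business_problem', 'Not provided')}
-- - **End Users**: {project_data.get('end_users', 'Not provided')}""")
--
--     # Data & Inputs
--     if any(project_data.get(f) for f in ['data_sources', 'data_collection_storage', 'sensitive_data']):
--         sections.append(f"""## Data & Inputs
-- - **Data Sources**: {project_data.get('data_sources', 'Not provided')}
-- - **Data Collection, Storage & Processing**: {project_data.get('data_collection_storage', 'Not provided')}
-- - **Sensitive/Personal Data**: {project_data.get('sensitive_data', 'Not provided')}""")
--
--     # Model & Technology
--     if any(project_data.get(f) for f in ['ai_models', 'model_type', 'environments_connectors']):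
--         sections.append(f"""## Model & Technology
-- - **AI Models/Techniques**: {project_data.get('ai_models', 'Not provided')}
-- - **Model Type**: {project_data.get('model_type', 'Not specified')}
-- - **Environments & Connectors**: {project_data.get('environments_connectors', 'Not provided')}""")
--
--     # Fairness & Bias
--     if any(project_data.get(f) for f in ['bias_checking', 'bias_mitigation']):
--         sections.append(f"""## Fairness & Bias
-- - **Bias Detection Methods**: {project_data.get('bias_checking', 'Not provided')}
-- - **Mitigation Strategies**: {project_data.get('bias_mitigation', 'Not provided')}""")
--
--     # Transparency & Explainability
--     if any(project_data.get(f) for f in ['decision_explainability', 'output_documentation']):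
--         sections.append(f"""## Transparency & Explainability
-- - **Decision Explainability**: {project_data.get('decision_explainability', 'Not provided')}
-- - **Output Documentation**: {project_data.get('output_documentation', 'Not provided')}""")
--
--     # Accountability & Governance
--     if any(project_data.get(f) for f in ['system_ownership', 'escalation_paths']):
--         sections.append(f"""## Accountability & Governance
-- - **System Ownership**: {project_data.get('system_ownership', 'Not provided')}
-- - **Escalation Paths**: {project_data.get('escalation_paths', 'Not provided')}""")
--
--     # Security & Privacy
--     if any(project_data.get(f) for f in ['data_security', 'privacy_compliance']):
--         sections.append(f"""## Security & Privacy
-- - **Data Security**: {project_data.get('data_security', 'Not provided')}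
-- - **Privacy Compliance**: {project_data.get('privacy_compliance', 'Not provided')}""")
--
--     # Impact & Risk
--     if any(project_data.get(f) for f in ['potential_risks', 'risk_monitoring']):
--         sections.append(f"""## Impact & Risk
-- - **Potential Risks**: {project_data.get('potential_risks', 'Not provided')}
-- - **Risk Monitoring & Mitigation**: {project_data.get('risk_monitoring', 'Not provided')}""")
--
--     # User Interaction
--     if any(project_data.get(f) for f in ['user_interaction_method', 'human_in_loop']):
--         sections.append(f"""## User Interaction
-- - **Interaction Method**: {project_data.get('user_interaction_method', 'Not specified')}
-- - **Human-in-the-Loop**: {project_data.get('human_in_loop', 'Not specified')}""")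
--
--     full_prompt = f"""# Comprehensive Responsible AI Review Request
--
-- This is a DETAILED review submission with comprehensive information provided across all RAI dimensions. Please provide thorough, specific recommendations based on the detailed information provided.
--
-- {''.join(sections)}
--
-- ---
--
-- Based on this comprehensive information, please provide:
-- 1. An overall assessment considering ALL the information provided
-- 2. Specific recommendations that address gaps identified in each section
-- 3. Prioritized action items based on the deployment stage and risks identified
-- 4. Recommended Microsoft tools with official documentation links
--
-- Focus on actionable, specific recommendations rather than generic advice since detailed context has been provided."""
--
--     return full_prompt
-- ===== SOURCE B (Python) =====
-- # B: a miniature template engine -- the body is a flat line-oriented template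
-- # ("%%" lines separate blocks, "{key|default}" placeholders carry the data slots);
-- # one pass scans the lines, substitutes placeholders, and on each block flush keeps
-- # the block iff it is the first one or one of the keys it declared is truthy.
-- # Byte-identical output to A (objective: alternative).
--
-- _TEMPLATE_LINES = [
--     "## Project Overview",
--     "- **Project Name**: {project_name|Not provided}",
--     "- **Deployment Stage**: {deployment_stage|Not specified}",
--     "%%",
--     "## Purpose & Use Case",
--     "- **Intended Purpose**: {intended_purpose|Not provided}",
--     "- **Business Problem**: {business_problem|Not provided}",
--     "- **End Users**: {end_users|Not provided}",
--     "%%",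
--     "## Data & Inputs",
--     "- **Data Sources**: {data_sources|Not provided}",
--     "- **Data Collection, Storage & Processing**: {data_collection_storage|Not provided}",
--     "- **Sensitive/Personal Data**: {sensitive_data|Not provided}",
--     "%%",
--     "## Model & Technology",
--     "- **AI Models/Techniques**: {ai_models|Not provided}",
--     "- **Model Type**: {model_type|Not specified}",
--     "- **Environments & Connectors**: {environments_connectors|Not provided}",
--     "%%",
--     "## Fairness & Bias",
--     "- **Bias Detection Methods**: {bias_checking|Not provided}",
--     "- **Mitigation Strategies**: {bias_mitigation|Not provided}",
--     "%%",
--     "## Transparency & Explainability",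
--     "- **Decision Explainability**: {decision_explainability|Not provided}",
--     "- **Output Documentation**: {output_documentation|Not provided}",
--     "%%",
--     "## Accountability & Governance",
--     "- **System Ownership**: {system_ownership|Not provided}",
--     "- **Escalation Paths**: {escalation_paths|Not provided}",
--     "%%",
--     "## Security & Privacy",
--     "- **Data Security**: {data_security|Not provided}",
--     "- **Privacy Compliance**: {privacy_compliance|Not provided}",
--     "%%",
--     "## Impact & Risk",
--     "- **Potential Risks**: {potential_risks|Not provided}",
--     "- **Risk Monitoring & Mitigation**: {risk_monitoring|Not provided}",
--     "%%",
--     "## User Interaction",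
--     "- **Interaction Method**: {user_interaction_method|Not specified}",
--     "- **Human-in-the-Loop**: {human_in_loop|Not specified}",
-- ]
--
-- _PREFIX = """# Comprehensive Responsible AI Review Request
--
-- This is a DETAILED review submission with comprehensive information provided across all RAI dimensions. Please provide thorough, specific recommendations based on the detailed information provided.
--
-- """
--
-- _SUFFIX = """
--
-- ---
--
-- Based on this comprehensive information, please provide:
-- 1. An overall assessment considering ALL the information provided
-- 2. Specific recommendations that address gaps identified in each section
-- 3. Prioritized action items based on the deployment stage and risks identified
-- 4. Recommended Microsoft tools with official documentation links
--
-- Focus on actionable, specific recommendations rather than generic advice since detailed context has been provided."""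
--
--
-- def build_advanced_prompt(project_data):
--     rendered = []
--     lines, keys, first = [], [], True
--     for raw in _TEMPLATE_LINES + ["%%"]:
--         if raw == "%%":  # end of block: keep it if first, or if any declared key is truthy
--             if first or any(project_data.get(k) for k in keys):
--                 rendered.append("\n".join(lines))
--             lines, keys, first = [], [], False
--         elif "{" in raw:  # placeholder line: substitute and record the key
--             head, placeholder = raw.split("{", 1)
--             key, default = placeholder[:-1].split("|", 1)
--             keys.append(key)
--             lines.append(head + project_data.get(key, default))
--         else:  # plain text line
--             lines.append(raw)
--     return _PREFIX + "".join(rendered) + _SUFFIX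
-- ===== Notes on version B (the rewrite author's own statement) =====
-- stated objective: alternative
-- what changed: Replaces A's ten hand-written guarded f-string blocks with a miniature template engine: the body is a flat line-oriented template ('%%' separator lines, '{key|default}' placeholder lines) scanned in one pass that parses each placeholder with string ops, substitutes the dict lookup, and flushes each block gated by the keys it was found to declare.
import Mathlib
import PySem

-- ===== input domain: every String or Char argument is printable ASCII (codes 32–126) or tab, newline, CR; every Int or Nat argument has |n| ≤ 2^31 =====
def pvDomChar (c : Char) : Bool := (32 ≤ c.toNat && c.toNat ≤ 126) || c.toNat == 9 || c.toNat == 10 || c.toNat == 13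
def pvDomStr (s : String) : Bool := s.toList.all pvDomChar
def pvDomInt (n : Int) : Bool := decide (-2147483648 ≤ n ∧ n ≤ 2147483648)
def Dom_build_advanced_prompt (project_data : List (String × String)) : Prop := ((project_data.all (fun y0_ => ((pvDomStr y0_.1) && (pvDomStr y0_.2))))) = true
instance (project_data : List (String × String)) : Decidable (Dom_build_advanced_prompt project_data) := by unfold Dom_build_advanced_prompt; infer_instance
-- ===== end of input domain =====

set_option maxRecDepth 8000

-- B replaces A's ten hand-written guarded f-string blocks with a miniature template engine:
-- a line-oriented template ("%%" separators, {key|default} placeholders) scanned in one pass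
-- at call time; byte-identical output (objective: alternative).

-- ===== PORT A =====
-- dict.get on the assoc-list encoding of a Python dict: first match, default otherwise (exact)
def pvGet (d : List (String × String)) (k dflt : String) : String :=
  match d.find? (fun p => p.1 == k) with
  | some p => p.2
  | none => dflt

-- truthiness of project_data.get(f): a present, non-empty string (exact: values are str)
def pvTruthy (d : List (String × String)) (k : String) : Bool :=
  match d.find? (fun p => p.1 == k) with
  | some p => p.2 != ""
  | none => false

-- literal transliteration of A: one explicit append per section, each guarded by its own any(...)
def build_advanced_prompt (project_data : List (String × String)) : String :=
  let sections : List String := []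
  let sections := sections ++ ["## Project Overview\n- **Project Name**: " ++ pvGet project_data "project_name" "Not provided" ++ "\n- **Deployment Stage**: " ++ pvGet project_data "deployment_stage" "Not specified"]
  let sections := if ["intended_purpose", "business_problem", "end_users"].any (fun f => pvTruthy project_data f) then sections ++ ["## Purpose & Use Case\n- **Intended Purpose**: " ++ pvGet project_data "intended_purpose" "Not provided" ++ "\n- **Business Problem**: " ++ pvGet project_data "business_problem" "Not provided" ++ "\n- **End Users**: " ++ pvGet project_data "end_users" "Not provided"] else sections
  let sections := if ["data_sources", "data_collection_storage", "sensitive_data"].any (fun f => pvTruthy project_data f) then sections ++ ["## Data & Inputs\n- **Data Sources**: " ++ pvGet project_data "data_sources" "Not provided" ++ "\n- **Data Collection, Storage & Processing**: " ++ pvGet project_data "data_collection_storage" "Not provided" ++ "\n- **Sensitive/Personal Data**: " ++ pvGet project_data "sensitive_data" "Not provided"] else sections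
  let sections := if ["ai_models", "model_type", "environments_connectors"].any (fun f => pvTruthy project_data f) then sections ++ ["## Model & Technology\n- **AI Models/Techniques**: " ++ pvGet project_data "ai_models" "Not provided" ++ "\n- **Model Type**: " ++ pvGet project_data "model_type" "Not specified" ++ "\n- **Environments & Connectors**: " ++ pvGet project_data "environments_connectors" "Not provided"] else sections
  let sections := if ["bias_checking", "bias_mitigation"].any (fun f => pvTruthy project_data f) then sections ++ ["## Fairness & Bias\n- **Bias Detection Methods**: " ++ pvGet project_data "bias_checking" "Not provided" ++ "\n- **Mitigation Strategies**: " ++ pvGet project_data "bias_mitigation" "Not provided"] else sections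
  let sections := if ["decision_explainability", "output_documentation"].any (fun f => pvTruthy project_data f) then sections ++ ["## Transparency & Explainability\n- **Decision Explainability**: " ++ pvGet project_data "decision_explainability" "Not provided" ++ "\n- **Output Documentation**: " ++ pvGet project_data "output_documentation" "Not provided"] else sections
  let sections := if ["system_ownership", "escalation_paths"].any (fun f => pvTruthy project_data f) then sections ++ ["## Accountability & Governance\n- **System Ownership**: " ++ pvGet project_data "system_ownership" "Not provided" ++ "\n- **Escalation Paths**: " ++ pvGet project_data "escalation_paths" "Not provided"] else sections
  let sections := if ["data_security", "privacy_compliance"].any (fun f => pvTruthy project_data f) then sections ++ ["## Security & Privacy\n- **Data Security**: " ++ pvGet project_data "data_security" "Not provided" ++ "\n- **Privacy Compliance**: " ++ pvGet project_data "privacy_compliance" "Not provided"] else sections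
  let sections := if ["potential_risks", "risk_monitoring"].any (fun f => pvTruthy project_data f) then sections ++ ["## Impact & Risk\n- **Potential Risks**: " ++ pvGet project_data "potential_risks" "Not provided" ++ "\n- **Risk Monitoring & Mitigation**: " ++ pvGet project_data "risk_monitoring" "Not provided"] else sections
  let sections := if ["user_interaction_method", "human_in_loop"].any (fun f => pvTruthy project_data f) then sections ++ ["## User Interaction\n- **Interaction Method**: " ++ pvGet project_data "user_interaction_method" "Not specified" ++ "\n- **Human-in-the-Loop**: " ++ pvGet project_data "human_in_loop" "Not specified"] else sections
  "# Comprehensive Responsible AI Review Request\n\nThis is a DETAILED review submission with comprehensive information provided across all RAI dimensions. Please provide thorough, specific recommendations based on the detailed information provided.\n\n" ++ PySem.Str.join "" sections ++ "\n\n---\n\nBased on this comprehensive information, please provide:\n1. An overall assessment considering ALL the information provided\n2. Specific recommendations that address gaps identified in each section\n3. Prioritized action items based on the deployment stage and risks identified\n4. Recommended Microsoft tools with official documentation links\n\nFocus on actionable, specific recommendations rather than generic advice since detailed context has been provided."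

-- ===== PORT B =====
-- B's line-oriented template: "%%" lines separate blocks, {key|default} lines are data slots
def bTemplateLines : List String := [
  "## Project Overview",
  "- **Project Name**: {project_name|Not provided}",
  "- **Deployment Stage**: {deployment_stage|Not specified}",
  "%%",
  "## Purpose & Use Case",
  "- **Intended Purpose**: {intended_purpose|Not provided}",
  "- **Business Problem**: {business_problem|Not provided}",
  "- **End Users**: {end_users|Not provided}",
  "%%",
  "## Data & Inputs",
  "- **Data Sources**: {data_sources|Not provided}",
  "- **Data Collection, Storage & Processing**: {data_collection_storage|Not provided}",
  "- **Sensitive/Personal Data**: {sensitive_data|Not provided}",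
  "%%",
  "## Model & Technology",
  "- **AI Models/Techniques**: {ai_models|Not provided}",
  "- **Model Type**: {model_type|Not specified}",
  "- **Environments & Connectors**: {environments_connectors|Not provided}",
  "%%",
  "## Fairness & Bias",
  "- **Bias Detection Methods**: {bias_checking|Not provided}",
  "- **Mitigation Strategies**: {bias_mitigation|Not provided}",
  "%%",
  "## Transparency & Explainability",
  "- **Decision Explainability**: {decision_explainability|Not provided}",
  "- **Output Documentation**: {output_documentation|Not provided}",
  "%%",
  "## Accountability & Governance",
  "- **System Ownership**: {system_ownership|Not provided}",
  "- **Escalation Paths**: {escalation_paths|Not provided}",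
  "%%",
  "## Security & Privacy",
  "- **Data Security**: {data_security|Not provided}",
  "- **Privacy Compliance**: {privacy_compliance|Not provided}",
  "%%",
  "## Impact & Risk",
  "- **Potential Risks**: {potential_risks|Not provided}",
  "- **Risk Monitoring & Mitigation**: {risk_monitoring|Not provided}",
  "%%",
  "## User Interaction",
  "- **Interaction Method**: {user_interaction_method|Not specified}",
  "- **Human-in-the-Loop**: {human_in_loop|Not specified}"
]

-- one scanner step over the state (rendered blocks, current lines, current keys, first-block flag):
-- "%%" flushes the current block (kept if first or a declared key is truthy); a "{key|default}"
-- line substitutes the dict lookup and records the key; any other line passes through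
def bStep (pd : List (String × String))
    (st : List String × List String × List String × Bool) (raw : String) :
    List String × List String × List String × Bool :=
  if raw == "%%" then
    ((if st.2.2.2 || st.2.2.1.any (fun k => pvTruthy pd k)
      then st.1 ++ [PySem.Str.join "\n" st.2.1] else st.1), [], [], false)
  else if PySem.Str.isIn "{" raw then
    match PySem.Str.splitMax? raw "{" 1 with
    | some [head, placeholder] =>
      match PySem.Str.splitMax? (PySem.Str.slice placeholder none (some (-1))) "|" 1 with
      | some [key, dflt] => (st.1, st.2.1 ++ [head ++ pvGet pd key dflt], st.2.2.1 ++ [key], st.2.2.2)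
      | _ => st  -- unreachable on the fixed template (every placeholder contains "|")
    | _ => st    -- unreachable on the fixed template
  else (st.1, st.2.1 ++ [raw], st.2.2.1, st.2.2.2)

-- literal transliteration of B: one pass over the template lines (plus a closing "%%")
def build_advanced_prompt_alt (project_data : List (String × String)) : String :=
  let st := (bTemplateLines ++ ["%%"]).foldl (bStep project_data) ([], [], [], true)
  "# Comprehensive Responsible AI Review Request\n\nThis is a DETAILED review submission with comprehensive information provided across all RAI dimensions. Please provide thorough, specific recommendations based on the detailed information provided.\n\n" ++ PySem.Str.join "" st.1 ++ "\n\n---\n\nBased on this comprehensive information, please provide:\n1. An overall assessment considering ALL the information provided\n2. Specific recommendations that address gaps identified in each section\n3. Prioritized action items based on the deployment stage and risks identified\n4. Recommended Microsoft tools with official documentation links\n\nFocus on actionable, specific recommendations rather than generic advice since detailed context has been provided."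

-- ===== PRECONDITION & SPEC =====
def Spec_build_advanced_prompt (project_data : List (String × String)) (out : String) : Prop := out = build_advanced_prompt_alt project_data
instance (project_data : List (String × String)) (out : String) : Decidable (Spec_build_advanced_prompt project_data out) := by unfold Spec_build_advanced_prompt; infer_instance

-- ===== CLAIM (what is proved, stated in full; the proofs are below) =====
def Claim_equal_build_advanced_prompt : Prop := ∀ (project_data : List (String × String)), Dom_build_advanced_prompt project_data → Spec_build_advanced_prompt project_data (build_advanced_prompt project_data)

-- ===== LEMMAS AND PROOFS =====

-- a "%%" line flushes the current block
lemma bStep_sep (pd : List (String × String)) (R Ls K : List String) (f : Bool) :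
    bStep pd (R, Ls, K, f) "%%" =
      ((if f || K.any (fun k => pvTruthy pd k) then R ++ [PySem.Str.join "\n" Ls] else R), [], [], false) := rfl

lemma bHdr_0 (pd : List (String × String)) (R Ls K : List String) (f : Bool) :
    bStep pd (R, Ls, K, f) "## Project Overview" = (R, Ls ++ ["## Project Overview"], K, f) := by
  simp only [bStep, (show ("## Project Overview" == "%%") = false from by decide),
    (show PySem.Str.isIn "{" "## Project Overview" = false from by decide), Bool.false_eq_true, if_false]

lemma bPh_0_0 (pd : List (String × String)) (R Ls K : List String) (f : Bool) :
    bStep pd (R, Ls, K, f) "- **Project Name**: {project_name|Not provided}" = (R, Ls ++ ["- **Project Name**: " ++ pvGet pd "project_name" "Not provided"], K ++ ["project_name"], f) := by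
  simp only [bStep, (show ("- **Project Name**: {project_name|Not provided}" == "%%") = false from by decide),
    (show PySem.Str.isIn "{" "- **Project Name**: {project_name|Not provided}" = true from by decide),
    (show PySem.Str.splitMax? "- **Project Name**: {project_name|Not provided}" "{" 1 = some ["- **Project Name**: ", "project_name|Not provided}"] from by decide),
    (show PySem.Str.splitMax? (PySem.Str.slice "project_name|Not provided}" none (some (-1))) "|" 1 = some ["project_name", "Not provided"] from by decide),
    Bool.false_eq_true, if_false, if_true]

lemma bPh_0_1 (pd : List (String × String)) (R Ls K : List String) (f : Bool) :
    bStep pd (R, Ls, K, f) "- **Deployment Stage**: {deployment_stage|Not specified}" = (R, Ls ++ ["- **Deployment Stage**: " ++ pvGet pd "deployment_stage" "Not specified"], K ++ ["deployment_stage"], f) := by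
  simp only [bStep, (show ("- **Deployment Stage**: {deployment_stage|Not specified}" == "%%") = false from by decide),
    (show PySem.Str.isIn "{" "- **Deployment Stage**: {deployment_stage|Not specified}" = true from by decide),
    (show PySem.Str.splitMax? "- **Deployment Stage**: {deployment_stage|Not specified}" "{" 1 = some ["- **Deployment Stage**: ", "deployment_stage|Not specified}"] from by decide),
    (show PySem.Str.splitMax? (PySem.Str.slice "deployment_stage|Not specified}" none (some (-1))) "|" 1 = some ["deployment_stage", "Not specified"] from by decide),
    Bool.false_eq_true, if_false, if_true]

lemma bHdr_1 (pd : List (String × String)) (R Ls K : List String) (f : Bool) :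
    bStep pd (R, Ls, K, f) "## Purpose & Use Case" = (R, Ls ++ ["## Purpose & Use Case"], K, f) := by
  simp only [bStep, (show ("## Purpose & Use Case" == "%%") = false from by decide),
    (show PySem.Str.isIn "{" "## Purpose & Use Case" = false from by decide), Bool.false_eq_true, if_false]

lemma bPh_1_0 (pd : List (String × String)) (R Ls K : List String) (f : Bool) :
    bStep pd (R, Ls, K, f) "- **Intended Purpose**: {intended_purpose|Not provided}" = (R, Ls ++ ["- **Intended Purpose**: " ++ pvGet pd "intended_purpose" "Not provided"], K ++ ["intended_purpose"], f) := by
  simp only [bStep, (show ("- **Intended Purpose**: {intended_purpose|Not provided}" == "%%") = false from by decide),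
    (show PySem.Str.isIn "{" "- **Intended Purpose**: {intended_purpose|Not provided}" = true from by decide),
    (show PySem.Str.splitMax? "- **Intended Purpose**: {intended_purpose|Not provided}" "{" 1 = some ["- **Intended Purpose**: ", "intended_purpose|Not provided}"] from by decide),
    (show PySem.Str.splitMax? (PySem.Str.slice "intended_purpose|Not provided}" none (some (-1))) "|" 1 = some ["intended_purpose", "Not provided"] from by decide),
    Bool.false_eq_true, if_false, if_true]

lemma bPh_1_1 (pd : List (String × String)) (R Ls K : List String) (f : Bool) :
    bStep pd (R, Ls, K, f) "- **Business Problem**: {business_problem|Not provided}" = (R, Ls ++ ["- **Business Problem**: " ++ pvGet pd "business_problem" "Not provided"], K ++ ["business_problem"], f) := by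
  simp only [bStep, (show ("- **Business Problem**: {business_problem|Not provided}" == "%%") = false from by decide),
    (show PySem.Str.isIn "{" "- **Business Problem**: {business_problem|Not provided}" = true from by decide),
    (show PySem.Str.splitMax? "- **Business Problem**: {business_problem|Not provided}" "{" 1 = some ["- **Business Problem**: ", "business_problem|Not provided}"] from by decide),
    (show PySem.Str.splitMax? (PySem.Str.slice "business_problem|Not provided}" none (some (-1))) "|" 1 = some ["business_problem", "Not provided"] from by decide),
    Bool.false_eq_true, if_false, if_true]

lemma bPh_1_2 (pd : List (String × String)) (R Ls K : List String) (f : Bool) :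
    bStep pd (R, Ls, K, f) "- **End Users**: {end_users|Not provided}" = (R, Ls ++ ["- **End Users**: " ++ pvGet pd "end_users" "Not provided"], K ++ ["end_users"], f) := by
  simp only [bStep, (show ("- **End Users**: {end_users|Not provided}" == "%%") = false from by decide),
    (show PySem.Str.isIn "{" "- **End Users**: {end_users|Not provided}" = true from by decide),
    (show PySem.Str.splitMax? "- **End Users**: {end_users|Not provided}" "{" 1 = some ["- **End Users**: ", "end_users|Not provided}"] from by decide),
    (show PySem.Str.splitMax? (PySem.Str.slice "end_users|Not provided}" none (some (-1))) "|" 1 = some ["end_users", "Not provided"] from by decide),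
    Bool.false_eq_true, if_false, if_true]

lemma bHdr_2 (pd : List (String × String)) (R Ls K : List String) (f : Bool) :
    bStep pd (R, Ls, K, f) "## Data & Inputs" = (R, Ls ++ ["## Data & Inputs"], K, f) := by
  simp only [bStep, (show ("## Data & Inputs" == "%%") = false from by decide),
    (show PySem.Str.isIn "{" "## Data & Inputs" = false from by decide), Bool.false_eq_true, if_false]

lemma bPh_2_0 (pd : List (String × String)) (R Ls K : List String) (f : Bool) :
    bStep pd (R, Ls, K, f) "- **Data Sources**: {data_sources|Not provided}" = (R, Ls ++ ["- **Data Sources**: " ++ pvGet pd "data_sources" "Not provided"], K ++ ["data_sources"], f) := by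
  simp only [bStep, (show ("- **Data Sources**: {data_sources|Not provided}" == "%%") = false from by decide),
    (show PySem.Str.isIn "{" "- **Data Sources**: {data_sources|Not provided}" = true from by decide),
    (show PySem.Str.splitMax? "- **Data Sources**: {data_sources|Not provided}" "{" 1 = some ["- **Data Sources**: ", "data_sources|Not provided}"] from by decide),
    (show PySem.Str.splitMax? (PySem.Str.slice "data_sources|Not provided}" none (some (-1))) "|" 1 = some ["data_sources", "Not provided"] from by decide),
    Bool.false_eq_true, if_false, if_true]

lemma bPh_2_1 (pd : List (String × String)) (R Ls K : List String) (f : Bool) :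
    bStep pd (R, Ls, K, f) "- **Data Collection, Storage & Processing**: {data_collection_storage|Not provided}" = (R, Ls ++ ["- **Data Collection, Storage & Processing**: " ++ pvGet pd "data_collection_storage" "Not provided"], K ++ ["data_collection_storage"], f) := by
  simp only [bStep, (show ("- **Data Collection, Storage & Processing**: {data_collection_storage|Not provided}" == "%%") = false from by decide),
    (show PySem.Str.isIn "{" "- **Data Collection, Storage & Processing**: {data_collection_storage|Not provided}" = true from by decide),
    (show PySem.Str.splitMax? "- **Data Collection, Storage & Processing**: {data_collection_storage|Not provided}" "{" 1 = some ["- **Data Collection, Storage & Processing**: ", "data_collection_storage|Not provided}"] from by decide),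
    (show PySem.Str.splitMax? (PySem.Str.slice "data_collection_storage|Not provided}" none (some (-1))) "|" 1 = some ["data_collection_storage", "Not provided"] from by decide),
    Bool.false_eq_true, if_false, if_true]

lemma bPh_2_2 (pd : List (String × String)) (R Ls K : List String) (f : Bool) :
    bStep pd (R, Ls, K, f) "- **Sensitive/Personal Data**: {sensitive_data|Not provided}" = (R, Ls ++ ["- **Sensitive/Personal Data**: " ++ pvGet pd "sensitive_data" "Not provided"], K ++ ["sensitive_data"], f) := by
  simp only [bStep, (show ("- **Sensitive/Personal Data**: {sensitive_data|Not provided}" == "%%") = false from by decide),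
    (show PySem.Str.isIn "{" "- **Sensitive/Personal Data**: {sensitive_data|Not provided}" = true from by decide),
    (show PySem.Str.splitMax? "- **Sensitive/Personal Data**: {sensitive_data|Not provided}" "{" 1 = some ["- **Sensitive/Personal Data**: ", "sensitive_data|Not provided}"] from by decide),
    (show PySem.Str.splitMax? (PySem.Str.slice "sensitive_data|Not provided}" none (some (-1))) "|" 1 = some ["sensitive_data", "Not provided"] from by decide),
    Bool.false_eq_true, if_false, if_true]

lemma bHdr_3 (pd : List (String × String)) (R Ls K : List String) (f : Bool) :
    bStep pd (R, Ls, K, f) "## Model & Technology" = (R, Ls ++ ["## Model & Technology"], K, f) := by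
  simp only [bStep, (show ("## Model & Technology" == "%%") = false from by decide),
    (show PySem.Str.isIn "{" "## Model & Technology" = false from by decide), Bool.false_eq_true, if_false]

lemma bPh_3_0 (pd : List (String × String)) (R Ls K : List String) (f : Bool) :
    bStep pd (R, Ls, K, f) "- **AI Models/Techniques**: {ai_models|Not provided}" = (R, Ls ++ ["- **AI Models/Techniques**: " ++ pvGet pd "ai_models" "Not provided"], K ++ ["ai_models"], f) := by
  simp only [bStep, (show ("- **AI Models/Techniques**: {ai_models|Not provided}" == "%%") = false from by decide),
    (show PySem.Str.isIn "{" "- **AI Models/Techniques**: {ai_models|Not provided}" = true from by decide),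
    (show PySem.Str.splitMax? "- **AI Models/Techniques**: {ai_models|Not provided}" "{" 1 = some ["- **AI Models/Techniques**: ", "ai_models|Not provided}"] from by decide),
    (show PySem.Str.splitMax? (PySem.Str.slice "ai_models|Not provided}" none (some (-1))) "|" 1 = some ["ai_models", "Not provided"] from by decide),
    Bool.false_eq_true, if_false, if_true]

lemma bPh_3_1 (pd : List (String × String)) (R Ls K : List String) (f : Bool) :
    bStep pd (R, Ls, K, f) "- **Model Type**: {model_type|Not specified}" = (R, Ls ++ ["- **Model Type**: " ++ pvGet pd "model_type" "Not specified"], K ++ ["model_type"], f) := by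
  simp only [bStep, (show ("- **Model Type**: {model_type|Not specified}" == "%%") = false from by decide),
    (show PySem.Str.isIn "{" "- **Model Type**: {model_type|Not specified}" = true from by decide),
    (show PySem.Str.splitMax? "- **Model Type**: {model_type|Not specified}" "{" 1 = some ["- **Model Type**: ", "model_type|Not specified}"] from by decide),
    (show PySem.Str.splitMax? (PySem.Str.slice "model_type|Not specified}" none (some (-1))) "|" 1 = some ["model_type", "Not specified"] from by decide),
    Bool.false_eq_true, if_false, if_true]

lemma bPh_3_2 (pd : List (String × String)) (R Ls K : List String) (f : Bool) :
    bStep pd (R, Ls, K, f) "- **Environments & Connectors**: {environments_connectors|Not provided}" = (R, Ls ++ ["- **Environments & Connectors**: " ++ pvGet pd "environments_connectors" "Not provided"], K ++ ["environments_connectors"], f) := by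
  simp only [bStep, (show ("- **Environments & Connectors**: {environments_connectors|Not provided}" == "%%") = false from by decide),
    (show PySem.Str.isIn "{" "- **Environments & Connectors**: {environments_connectors|Not provided}" = true from by decide),
    (show PySem.Str.splitMax? "- **Environments & Connectors**: {environments_connectors|Not provided}" "{" 1 = some ["- **Environments & Connectors**: ", "environments_connectors|Not provided}"] from by decide),
    (show PySem.Str.splitMax? (PySem.Str.slice "environments_connectors|Not provided}" none (some (-1))) "|" 1 = some ["environments_connectors", "Not provided"] from by decide),
    Bool.false_eq_true, if_false, if_true]

lemma bHdr_4 (pd : List (String × String)) (R Ls K : List String) (f : Bool) :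
    bStep pd (R, Ls, K, f) "## Fairness & Bias" = (R, Ls ++ ["## Fairness & Bias"], K, f) := by
  simp only [bStep, (show ("## Fairness & Bias" == "%%") = false from by decide),
    (show PySem.Str.isIn "{" "## Fairness & Bias" = false from by decide), Bool.false_eq_true, if_false]

lemma bPh_4_0 (pd : List (String × String)) (R Ls K : List String) (f : Bool) :
    bStep pd (R, Ls, K, f) "- **Bias Detection Methods**: {bias_checking|Not provided}" = (R, Ls ++ ["- **Bias Detection Methods**: " ++ pvGet pd "bias_checking" "Not provided"], K ++ ["bias_checking"], f) := by
  simp only [bStep, (show ("- **Bias Detection Methods**: {bias_checking|Not provided}" == "%%") = false from by decide),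
    (show PySem.Str.isIn "{" "- **Bias Detection Methods**: {bias_checking|Not provided}" = true from by decide),
    (show PySem.Str.splitMax? "- **Bias Detection Methods**: {bias_checking|Not provided}" "{" 1 = some ["- **Bias Detection Methods**: ", "bias_checking|Not provided}"] from by decide),
    (show PySem.Str.splitMax? (PySem.Str.slice "bias_checking|Not provided}" none (some (-1))) "|" 1 = some ["bias_checking", "Not provided"] from by decide),
    Bool.false_eq_true, if_false, if_true]

lemma bPh_4_1 (pd : List (String × String)) (R Ls K : List String) (f : Bool) :
    bStep pd (R, Ls, K, f) "- **Mitigation Strategies**: {bias_mitigation|Not provided}" = (R, Ls ++ ["- **Mitigation Strategies**: " ++ pvGet pd "bias_mitigation" "Not provided"], K ++ ["bias_mitigation"], f) := by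
  simp only [bStep, (show ("- **Mitigation Strategies**: {bias_mitigation|Not provided}" == "%%") = false from by decide),
    (show PySem.Str.isIn "{" "- **Mitigation Strategies**: {bias_mitigation|Not provided}" = true from by decide),
    (show PySem.Str.splitMax? "- **Mitigation Strategies**: {bias_mitigation|Not provided}" "{" 1 = some ["- **Mitigation Strategies**: ", "bias_mitigation|Not provided}"] from by decide),
    (show PySem.Str.splitMax? (PySem.Str.slice "bias_mitigation|Not provided}" none (some (-1))) "|" 1 = some ["bias_mitigation", "Not provided"] from by decide),
    Bool.false_eq_true, if_false, if_true]

lemma bHdr_5 (pd : List (String × String)) (R Ls K : List String) (f : Bool) :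
    bStep pd (R, Ls, K, f) "## Transparency & Explainability" = (R, Ls ++ ["## Transparency & Explainability"], K, f) := by
  simp only [bStep, (show ("## Transparency & Explainability" == "%%") = false from by decide),
    (show PySem.Str.isIn "{" "## Transparency & Explainability" = false from by decide), Bool.false_eq_true, if_false]

lemma bPh_5_0 (pd : List (String × String)) (R Ls K : List String) (f : Bool) :
    bStep pd (R, Ls, K, f) "- **Decision Explainability**: {decision_explainability|Not provided}" = (R, Ls ++ ["- **Decision Explainability**: " ++ pvGet pd "decision_explainability" "Not provided"], K ++ ["decision_explainability"], f) := by
  simp only [bStep, (show ("- **Decision Explainability**: {decision_explainability|Not provided}" == "%%") = false from by decide),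
    (show PySem.Str.isIn "{" "- **Decision Explainability**: {decision_explainability|Not provided}" = true from by decide),
    (show PySem.Str.splitMax? "- **Decision Explainability**: {decision_explainability|Not provided}" "{" 1 = some ["- **Decision Explainability**: ", "decision_explainability|Not provided}"] from by decide),
    (show PySem.Str.splitMax? (PySem.Str.slice "decision_explainability|Not provided}" none (some (-1))) "|" 1 = some ["decision_explainability", "Not provided"] from by decide),
    Bool.false_eq_true, if_false, if_true]

lemma bPh_5_1 (pd : List (String × String)) (R Ls K : List String) (f : Bool) :
    bStep pd (R, Ls, K, f) "- **Output Documentation**: {output_documentation|Not provided}" = (R, Ls ++ ["- **Output Documentation**: " ++ pvGet pd "output_documentation" "Not provided"], K ++ ["output_documentation"], f) := by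
  simp only [bStep, (show ("- **Output Documentation**: {output_documentation|Not provided}" == "%%") = false from by decide),
    (show PySem.Str.isIn "{" "- **Output Documentation**: {output_documentation|Not provided}" = true from by decide),
    (show PySem.Str.splitMax? "- **Output Documentation**: {output_documentation|Not provided}" "{" 1 = some ["- **Output Documentation**: ", "output_documentation|Not provided}"] from by decide),
    (show PySem.Str.splitMax? (PySem.Str.slice "output_documentation|Not provided}" none (some (-1))) "|" 1 = some ["output_documentation", "Not provided"] from by decide),
    Bool.false_eq_true, if_false, if_true]

lemma bHdr_6 (pd : List (String × String)) (R Ls K : List String) (f : Bool) :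
    bStep pd (R, Ls, K, f) "## Accountability & Governance" = (R, Ls ++ ["## Accountability & Governance"], K, f) := by
  simp only [bStep, (show ("## Accountability & Governance" == "%%") = false from by decide),
    (show PySem.Str.isIn "{" "## Accountability & Governance" = false from by decide), Bool.false_eq_true, if_false]

lemma bPh_6_0 (pd : List (String × String)) (R Ls K : List String) (f : Bool) :
    bStep pd (R, Ls, K, f) "- **System Ownership**: {system_ownership|Not provided}" = (R, Ls ++ ["- **System Ownership**: " ++ pvGet pd "system_ownership" "Not provided"], K ++ ["system_ownership"], f) := by
  simp only [bStep, (show ("- **System Ownership**: {system_ownership|Not provided}" == "%%") = false from by decide),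
    (show PySem.Str.isIn "{" "- **System Ownership**: {system_ownership|Not provided}" = true from by decide),
    (show PySem.Str.splitMax? "- **System Ownership**: {system_ownership|Not provided}" "{" 1 = some ["- **System Ownership**: ", "system_ownership|Not provided}"] from by decide),
    (show PySem.Str.splitMax? (PySem.Str.slice "system_ownership|Not provided}" none (some (-1))) "|" 1 = some ["system_ownership", "Not provided"] from by decide),
    Bool.false_eq_true, if_false, if_true]

lemma bPh_6_1 (pd : List (String × String)) (R Ls K : List String) (f : Bool) :
    bStep pd (R, Ls, K, f) "- **Escalation Paths**: {escalation_paths|Not provided}" = (R, Ls ++ ["- **Escalation Paths**: " ++ pvGet pd "escalation_paths" "Not provided"], K ++ ["escalation_paths"], f) := by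
  simp only [bStep, (show ("- **Escalation Paths**: {escalation_paths|Not provided}" == "%%") = false from by decide),
    (show PySem.Str.isIn "{" "- **Escalation Paths**: {escalation_paths|Not provided}" = true from by decide),
    (show PySem.Str.splitMax? "- **Escalation Paths**: {escalation_paths|Not provided}" "{" 1 = some ["- **Escalation Paths**: ", "escalation_paths|Not provided}"] from by decide),
    (show PySem.Str.splitMax? (PySem.Str.slice "escalation_paths|Not provided}" none (some (-1))) "|" 1 = some ["escalation_paths", "Not provided"] from by decide),
    Bool.false_eq_true, if_false, if_true]

lemma bHdr_7 (pd : List (String × String)) (R Ls K : List String) (f : Bool) :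
    bStep pd (R, Ls, K, f) "## Security & Privacy" = (R, Ls ++ ["## Security & Privacy"], K, f) := by
  simp only [bStep, (show ("## Security & Privacy" == "%%") = false from by decide),
    (show PySem.Str.isIn "{" "## Security & Privacy" = false from by decide), Bool.false_eq_true, if_false]

lemma bPh_7_0 (pd : List (String × String)) (R Ls K : List String) (f : Bool) :
    bStep pd (R, Ls, K, f) "- **Data Security**: {data_security|Not provided}" = (R, Ls ++ ["- **Data Security**: " ++ pvGet pd "data_security" "Not provided"], K ++ ["data_security"], f) := by
  simp only [bStep, (show ("- **Data Security**: {data_security|Not provided}" == "%%") = false from by decide),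
    (show PySem.Str.isIn "{" "- **Data Security**: {data_security|Not provided}" = true from by decide),
    (show PySem.Str.splitMax? "- **Data Security**: {data_security|Not provided}" "{" 1 = some ["- **Data Security**: ", "data_security|Not provided}"] from by decide),
    (show PySem.Str.splitMax? (PySem.Str.slice "data_security|Not provided}" none (some (-1))) "|" 1 = some ["data_security", "Not provided"] from by decide),
    Bool.false_eq_true, if_false, if_true]

lemma bPh_7_1 (pd : List (String × String)) (R Ls K : List String) (f : Bool) :
    bStep pd (R, Ls, K, f) "- **Privacy Compliance**: {privacy_compliance|Not provided}" = (R, Ls ++ ["- **Privacy Compliance**: " ++ pvGet pd "privacy_compliance" "Not provided"], K ++ ["privacy_compliance"], f) := by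
  simp only [bStep, (show ("- **Privacy Compliance**: {privacy_compliance|Not provided}" == "%%") = false from by decide),
    (show PySem.Str.isIn "{" "- **Privacy Compliance**: {privacy_compliance|Not provided}" = true from by decide),
    (show PySem.Str.splitMax? "- **Privacy Compliance**: {privacy_compliance|Not provided}" "{" 1 = some ["- **Privacy Compliance**: ", "privacy_compliance|Not provided}"] from by decide),
    (show PySem.Str.splitMax? (PySem.Str.slice "privacy_compliance|Not provided}" none (some (-1))) "|" 1 = some ["privacy_compliance", "Not provided"] from by decide),
    Bool.false_eq_true, if_false, if_true]

lemma bHdr_8 (pd : List (String × String)) (R Ls K : List String) (f : Bool) :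
    bStep pd (R, Ls, K, f) "## Impact & Risk" = (R, Ls ++ ["## Impact & Risk"], K, f) := by
  simp only [bStep, (show ("## Impact & Risk" == "%%") = false from by decide),
    (show PySem.Str.isIn "{" "## Impact & Risk" = false from by decide), Bool.false_eq_true, if_false]

lemma bPh_8_0 (pd : List (String × String)) (R Ls K : List String) (f : Bool) :
    bStep pd (R, Ls, K, f) "- **Potential Risks**: {potential_risks|Not provided}" = (R, Ls ++ ["- **Potential Risks**: " ++ pvGet pd "potential_risks" "Not provided"], K ++ ["potential_risks"], f) := by
  simp only [bStep, (show ("- **Potential Risks**: {potential_risks|Not provided}" == "%%") = false from by decide),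
    (show PySem.Str.isIn "{" "- **Potential Risks**: {potential_risks|Not provided}" = true from by decide),
    (show PySem.Str.splitMax? "- **Potential Risks**: {potential_risks|Not provided}" "{" 1 = some ["- **Potential Risks**: ", "potential_risks|Not provided}"] from by decide),
    (show PySem.Str.splitMax? (PySem.Str.slice "potential_risks|Not provided}" none (some (-1))) "|" 1 = some ["potential_risks", "Not provided"] from by decide),
    Bool.false_eq_true, if_false, if_true]

lemma bPh_8_1 (pd : List (String × String)) (R Ls K : List String) (f : Bool) :
    bStep pd (R, Ls, K, f) "- **Risk Monitoring & Mitigation**: {risk_monitoring|Not provided}" = (R, Ls ++ ["- **Risk Monitoring & Mitigation**: " ++ pvGet pd "risk_monitoring" "Not provided"], K ++ ["risk_monitoring"], f) := by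
  simp only [bStep, (show ("- **Risk Monitoring & Mitigation**: {risk_monitoring|Not provided}" == "%%") = false from by decide),
    (show PySem.Str.isIn "{" "- **Risk Monitoring & Mitigation**: {risk_monitoring|Not provided}" = true from by decide),
    (show PySem.Str.splitMax? "- **Risk Monitoring & Mitigation**: {risk_monitoring|Not provided}" "{" 1 = some ["- **Risk Monitoring & Mitigation**: ", "risk_monitoring|Not provided}"] from by decide),
    (show PySem.Str.splitMax? (PySem.Str.slice "risk_monitoring|Not provided}" none (some (-1))) "|" 1 = some ["risk_monitoring", "Not provided"] from by decide),
    Bool.false_eq_true, if_false, if_true]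

lemma bHdr_9 (pd : List (String × String)) (R Ls K : List String) (f : Bool) :
    bStep pd (R, Ls, K, f) "## User Interaction" = (R, Ls ++ ["## User Interaction"], K, f) := by
  simp only [bStep, (show ("## User Interaction" == "%%") = false from by decide),
    (show PySem.Str.isIn "{" "## User Interaction" = false from by decide), Bool.false_eq_true, if_false]

lemma bPh_9_0 (pd : List (String × String)) (R Ls K : List String) (f : Bool) :
    bStep pd (R, Ls, K, f) "- **Interaction Method**: {user_interaction_method|Not specified}" = (R, Ls ++ ["- **Interaction Method**: " ++ pvGet pd "user_interaction_method" "Not specified"], K ++ ["user_interaction_method"], f) := by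
  simp only [bStep, (show ("- **Interaction Method**: {user_interaction_method|Not specified}" == "%%") = false from by decide),
    (show PySem.Str.isIn "{" "- **Interaction Method**: {user_interaction_method|Not specified}" = true from by decide),
    (show PySem.Str.splitMax? "- **Interaction Method**: {user_interaction_method|Not specified}" "{" 1 = some ["- **Interaction Method**: ", "user_interaction_method|Not specified}"] from by decide),
    (show PySem.Str.splitMax? (PySem.Str.slice "user_interaction_method|Not specified}" none (some (-1))) "|" 1 = some ["user_interaction_method", "Not specified"] from by decide),
    Bool.false_eq_true, if_false, if_true]

lemma bPh_9_1 (pd : List (String × String)) (R Ls K : List String) (f : Bool) :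
    bStep pd (R, Ls, K, f) "- **Human-in-the-Loop**: {human_in_loop|Not specified}" = (R, Ls ++ ["- **Human-in-the-Loop**: " ++ pvGet pd "human_in_loop" "Not specified"], K ++ ["human_in_loop"], f) := by
  simp only [bStep, (show ("- **Human-in-the-Loop**: {human_in_loop|Not specified}" == "%%") = false from by decide),
    (show PySem.Str.isIn "{" "- **Human-in-the-Loop**: {human_in_loop|Not specified}" = true from by decide),
    (show PySem.Str.splitMax? "- **Human-in-the-Loop**: {human_in_loop|Not specified}" "{" 1 = some ["- **Human-in-the-Loop**: ", "human_in_loop|Not specified}"] from by decide),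
    (show PySem.Str.splitMax? (PySem.Str.slice "human_in_loop|Not specified}" none (some (-1))) "|" 1 = some ["human_in_loop", "Not specified"] from by decide),
    Bool.false_eq_true, if_false, if_true]

lemma bSec_0 (pd : List (String × String)) :
    PySem.Str.join "\n" ["## Project Overview", "- **Project Name**: " ++ pvGet pd "project_name" "Not provided", "- **Deployment Stage**: " ++ pvGet pd "deployment_stage" "Not specified"] = "## Project Overview\n- **Project Name**: " ++ pvGet pd "project_name" "Not provided" ++ "\n- **Deployment Stage**: " ++ pvGet pd "deployment_stage" "Not specified" := by
  rw [← String.toList_inj]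
  simp [PySem.Str.join, PySem.Chars.join, String.toList_append, List.intercalate]

lemma bSec_1 (pd : List (String × String)) :
    PySem.Str.join "\n" ["## Purpose & Use Case", "- **Intended Purpose**: " ++ pvGet pd "intended_purpose" "Not provided", "- **Business Problem**: " ++ pvGet pd "business_problem" "Not provided", "- **End Users**: " ++ pvGet pd "end_users" "Not provided"] = "## Purpose & Use Case\n- **Intended Purpose**: " ++ pvGet pd "intended_purpose" "Not provided" ++ "\n- **Business Problem**: " ++ pvGet pd "business_problem" "Not provided" ++ "\n- **End Users**: " ++ pvGet pd "end_users" "Not provided" := by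
  rw [← String.toList_inj]
  simp [PySem.Str.join, PySem.Chars.join, String.toList_append, List.intercalate]

lemma bSec_2 (pd : List (String × String)) :
    PySem.Str.join "\n" ["## Data & Inputs", "- **Data Sources**: " ++ pvGet pd "data_sources" "Not provided", "- **Data Collection, Storage & Processing**: " ++ pvGet pd "data_collection_storage" "Not provided", "- **Sensitive/Personal Data**: " ++ pvGet pd "sensitive_data" "Not provided"] = "## Data & Inputs\n- **Data Sources**: " ++ pvGet pd "data_sources" "Not provided" ++ "\n- **Data Collection, Storage & Processing**: " ++ pvGet pd "data_collection_storage" "Not provided" ++ "\n- **Sensitive/Personal Data**: " ++ pvGet pd "sensitive_data" "Not provided" := by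
  rw [← String.toList_inj]
  simp [PySem.Str.join, PySem.Chars.join, String.toList_append, List.intercalate]

lemma bSec_3 (pd : List (String × String)) :
    PySem.Str.join "\n" ["## Model & Technology", "- **AI Models/Techniques**: " ++ pvGet pd "ai_models" "Not provided", "- **Model Type**: " ++ pvGet pd "model_type" "Not specified", "- **Environments & Connectors**: " ++ pvGet pd "environments_connectors" "Not provided"] = "## Model & Technology\n- **AI Models/Techniques**: " ++ pvGet pd "ai_models" "Not provided" ++ "\n- **Model Type**: " ++ pvGet pd "model_type" "Not specified" ++ "\n- **Environments & Connectors**: " ++ pvGet pd "environments_connectors" "Not provided" := by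
  rw [← String.toList_inj]
  simp [PySem.Str.join, PySem.Chars.join, String.toList_append, List.intercalate]

lemma bSec_4 (pd : List (String × String)) :
    PySem.Str.join "\n" ["## Fairness & Bias", "- **Bias Detection Methods**: " ++ pvGet pd "bias_checking" "Not provided", "- **Mitigation Strategies**: " ++ pvGet pd "bias_mitigation" "Not provided"] = "## Fairness & Bias\n- **Bias Detection Methods**: " ++ pvGet pd "bias_checking" "Not provided" ++ "\n- **Mitigation Strategies**: " ++ pvGet pd "bias_mitigation" "Not provided" := by
  rw [← String.toList_inj]
  simp [PySem.Str.join, PySem.Chars.join, String.toList_append, List.intercalate]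

lemma bSec_5 (pd : List (String × String)) :
    PySem.Str.join "\n" ["## Transparency & Explainability", "- **Decision Explainability**: " ++ pvGet pd "decision_explainability" "Not provided", "- **Output Documentation**: " ++ pvGet pd "output_documentation" "Not provided"] = "## Transparency & Explainability\n- **Decision Explainability**: " ++ pvGet pd "decision_explainability" "Not provided" ++ "\n- **Output Documentation**: " ++ pvGet pd "output_documentation" "Not provided" := by
  rw [← String.toList_inj]
  simp [PySem.Str.join, PySem.Chars.join, String.toList_append, List.intercalate]

lemma bSec_6 (pd : List (String × String)) :
    PySem.Str.join "\n" ["## Accountability & Governance", "- **System Ownership**: " ++ pvGet pd "system_ownership" "Not provided", "- **Escalation Paths**: " ++ pvGet pd "escalation_paths" "Not provided"] = "## Accountability & Governance\n- **System Ownership**: " ++ pvGet pd "system_ownership" "Not provided" ++ "\n- **Escalation Paths**: " ++ pvGet pd "escalation_paths" "Not provided" := by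
  rw [← String.toList_inj]
  simp [PySem.Str.join, PySem.Chars.join, String.toList_append, List.intercalate]

lemma bSec_7 (pd : List (String × String)) :
    PySem.Str.join "\n" ["## Security & Privacy", "- **Data Security**: " ++ pvGet pd "data_security" "Not provided", "- **Privacy Compliance**: " ++ pvGet pd "privacy_compliance" "Not provided"] = "## Security & Privacy\n- **Data Security**: " ++ pvGet pd "data_security" "Not provided" ++ "\n- **Privacy Compliance**: " ++ pvGet pd "privacy_compliance" "Not provided" := by
  rw [← String.toList_inj]
  simp [PySem.Str.join, PySem.Chars.join, String.toList_append, List.intercalate]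

lemma bSec_8 (pd : List (String × String)) :
    PySem.Str.join "\n" ["## Impact & Risk", "- **Potential Risks**: " ++ pvGet pd "potential_risks" "Not provided", "- **Risk Monitoring & Mitigation**: " ++ pvGet pd "risk_monitoring" "Not provided"] = "## Impact & Risk\n- **Potential Risks**: " ++ pvGet pd "potential_risks" "Not provided" ++ "\n- **Risk Monitoring & Mitigation**: " ++ pvGet pd "risk_monitoring" "Not provided" := by
  rw [← String.toList_inj]
  simp [PySem.Str.join, PySem.Chars.join, String.toList_append, List.intercalate]

lemma bSec_9 (pd : List (String × String)) :
    PySem.Str.join "\n" ["## User Interaction", "- **Interaction Method**: " ++ pvGet pd "user_interaction_method" "Not specified", "- **Human-in-the-Loop**: " ++ pvGet pd "human_in_loop" "Not specified"] = "## User Interaction\n- **Interaction Method**: " ++ pvGet pd "user_interaction_method" "Not specified" ++ "\n- **Human-in-the-Loop**: " ++ pvGet pd "human_in_loop" "Not specified" := by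
  rw [← String.toList_inj]
  simp [PySem.Str.join, PySem.Chars.join, String.toList_append, List.intercalate]

-- ===== VERDICT (by name: the statement is the Claim_ definition above) =====
set_option maxHeartbeats 4000000 in
theorem build_advanced_prompt_spec : Claim_equal_build_advanced_prompt := by
  intro project_data _
  unfold Spec_build_advanced_prompt
  simp only [build_advanced_prompt, build_advanced_prompt_alt, bTemplateLines]
  simp only [List.cons_append, List.nil_append]
  simp only [List.foldl]
  simp only [bHdr_0, bHdr_1, bHdr_2, bHdr_3, bHdr_4, bHdr_5, bHdr_6, bHdr_7, bHdr_8, bHdr_9, bPh_0_0, bPh_0_1, bPh_1_0, bPh_1_1, bPh_1_2, bPh_2_0, bPh_2_1, bPh_2_2, bPh_3_0, bPh_3_1, bPh_3_2, bPh_4_0, bPh_4_1, bPh_5_0, bPh_5_1, bPh_6_0, bPh_6_1, bPh_7_0, bPh_7_1, bPh_8_0, bPh_8_1, bPh_9_0, bPh_9_1, bStep_sep]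
  simp only [List.nil_append, List.cons_append, Bool.true_or, Bool.false_or, if_true]
  simp only [bSec_0, bSec_1, bSec_2, bSec_3, bSec_4, bSec_5, bSec_6, bSec_7, bSec_8, bSec_9]
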